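-- pv_equiv track=rewrite | github.com/randolchance/PythonProjects | ProjectEulerSolutions/PE125/PE125-PalindromicSums.py | makePalendrome
-- ===== SOURCE A (Python) =====
-- def makePalendrome(digits,first=False):
--     for n in range(first,10):
--         d = digits - 1
--         if d == 0:
--             yield(str(n))
--         else:
--             for m in makePalendrome(digits-1):
--                 yield(str(n)+m)
-- ===== SOURCE B (Python) =====
-- from itertools import product
--
-- def makePalendrome(digits, first=False):
--     for n in range(first, 10):
--         if digits == 1:
--             yield str(n)
--         else:
--             for rest in product("0123456789", repeat=digits - 1):
--                 yield str(n) + ''.join(rest)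
-- ===== Notes on version B (the rewrite author's own statement) =====
-- stated objective: idiomatic
-- what changed: Replaces A's per-level recursion with a single itertools.product enumeration of the digits-1 tail positions, gating only the leading digit by first.
import Mathlib
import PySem

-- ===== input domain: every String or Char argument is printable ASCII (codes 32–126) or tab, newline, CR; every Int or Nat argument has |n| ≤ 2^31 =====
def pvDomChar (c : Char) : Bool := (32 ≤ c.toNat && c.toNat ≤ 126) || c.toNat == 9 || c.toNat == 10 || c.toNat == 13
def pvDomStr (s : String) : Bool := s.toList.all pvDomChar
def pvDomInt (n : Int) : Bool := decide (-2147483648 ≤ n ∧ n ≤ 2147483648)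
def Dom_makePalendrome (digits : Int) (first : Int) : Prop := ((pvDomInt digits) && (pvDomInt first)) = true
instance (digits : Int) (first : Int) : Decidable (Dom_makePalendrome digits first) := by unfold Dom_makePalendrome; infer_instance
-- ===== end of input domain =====

-- B replaces A's per-level recursion by a single itertools.product enumeration of the
-- digits-1 tail positions (idiomatic, same cost; the ports prove the two orders coincide).

-- ===== PORT A =====
-- A recurses with digits decreasing by 1 until digits-1 = 0; depth digits.toNat of fuel is
-- exactly the recursion depth wherever A terminates (elsewhere A hits RecursionError, excluded by Pre_).
def makePalendromeFuel : Nat → Int → Int → List String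
  | 0, _, _ => []
  | fuel+1, digits, first =>
    (PySem.List.pyRange first 10 1).foldl (fun acc n =>
      let d := digits - 1
      if d = 0 then acc ++ [PySem.Int.toStr n]
      else acc ++ (makePalendromeFuel fuel (digits - 1) 0).map
             -- str(n) + m : exact char-level concatenation
             (fun m => String.ofList (PySem.Int.toChars n ++ m.toList))) []

def makePalendrome (digits : Int) (first : Int) : List String :=
  makePalendromeFuel digits.toNat digits first

-- ===== PORT B =====
def pvDigitChars : List Char := ['0','1','2','3','4','5','6','7','8','9']  -- "0123456789"

-- itertools.product("0123456789", repeat=k): tuples in lexicographic order, leftmost slowest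
def prodTuples : Nat → List (List Char)
  | 0 => [[]]
  | k+1 => pvDigitChars.flatMap (fun c => (prodTuples k).map (fun r => c :: r))

def makePalendrome_alt (digits : Int) (first : Int) : List String :=
  (PySem.List.pyRange first 10 1).flatMap (fun n =>
    if digits = 1 then [PySem.Int.toStr n]
    else (prodTuples (digits - 1).toNat).map
      -- str(n) + ''.join(rest) : join of single characters = those characters, concatenated
      (fun rest => String.ofList (PySem.Int.toChars n ++ rest)))

-- ===== PRECONDITION & SPEC =====
-- Pre_ excludes digits ≤ 0 with first < 10, where A raises RecursionError
-- (and B raises ValueError from product(repeat<0)); everywhere else A returns.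
def Pre_makePalendrome (digits : Int) (first : Int) : Prop := 1 ≤ digits ∨ 10 ≤ first
instance (digits : Int) (first : Int) : Decidable (Pre_makePalendrome digits first) := by
  unfold Pre_makePalendrome; infer_instance

def pvWitness_makePalendrome : Int × Int := (2, 0)

def Spec_makePalendrome (digits : Int) (first : Int) (out : List String) : Prop := out = makePalendrome_alt digits first
instance (digits : Int) (first : Int) (out : List String) : Decidable (Spec_makePalendrome digits first out) := by unfold Spec_makePalendrome; infer_instance

-- ===== CLAIM (what is proved, stated in full; the proofs are below) =====
def Claim_equal_makePalendrome : Prop := ∀ (digits : Int) (first : Int), Dom_makePalendrome digits first → Pre_makePalendrome digits first → Spec_makePalendrome digits first (makePalendrome digits first)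

-- ===== LEMMAS AND PROOFS =====

lemma pyRange_ten : PySem.List.pyRange 0 10 1 = [0,1,2,3,4,5,6,7,8,9] := by decide

-- one level of A's recursion (at first = 0) produces exactly the product tuples of level k+1
lemma inner_level (k : Nat) :
    (PySem.List.pyRange 0 10 1).flatMap (fun m =>
        if ((k : Int) + 1) - 1 = 0 then [PySem.Int.toStr m]
        else (prodTuples k).map (fun rest => String.ofList (PySem.Int.toChars m ++ rest)))
      = (prodTuples (k+1)).map String.ofList := by
  cases k with
  | zero => decide
  | succ k =>
      have hne : ((k : Int) + 1) ≠ 0 := by omega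
      rw [pyRange_ten]
      simp only [prodTuples, pvDigitChars, List.flatMap_cons, List.flatMap_nil,
        List.map_map, List.map_append, List.append_nil]
      have h0 : PySem.Int.toChars 0 = ['0'] := by decide
      have h1 : PySem.Int.toChars 1 = ['1'] := by decide
      have h2 : PySem.Int.toChars 2 = ['2'] := by decide
      have h3 : PySem.Int.toChars 3 = ['3'] := by decide
      have h4 : PySem.Int.toChars 4 = ['4'] := by decide
      have h5 : PySem.Int.toChars 5 = ['5'] := by decide
      have h6 : PySem.Int.toChars 6 = ['6'] := by decide
      have h7 : PySem.Int.toChars 7 = ['7'] := by decide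
      have h8 : PySem.Int.toChars 8 = ['8'] := by decide
      have h9 : PySem.Int.toChars 9 = ['9'] := by decide
      simp [hne, h0, h1, h2, h3, h4, h5, h6, h7, h8, h9, Function.comp_def]

lemma fuel_succ (fuel : Nat) (digits first : Int) :
    makePalendromeFuel (fuel+1) digits first
      = (PySem.List.pyRange first 10 1).foldl (fun acc n =>
          let d := digits - 1
          if d = 0 then acc ++ [PySem.Int.toStr n]
          else acc ++ (makePalendromeFuel fuel (digits - 1) 0).map
                 (fun m => String.ofList (PySem.Int.toChars n ++ m.toList))) [] := rfl

lemma main_level (k : Nat) : ∀ first : Int,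
    makePalendromeFuel (k+1) ((k : Int) + 1) first
      = (PySem.List.pyRange first 10 1).flatMap (fun n =>
          if ((k : Int) + 1) - 1 = 0 then [PySem.Int.toStr n]
          else (prodTuples k).map (fun rest => String.ofList (PySem.Int.toChars n ++ rest))) := by
  induction k with
  | zero =>
      intro first
      simp [makePalendromeFuel, List.flatMap]
  | succ k ih =>
      intro first
      have hne : ((k : Int) + 1) ≠ 0 := by omega
      have hd : (((k+1 : Nat) : Int) + 1) - 1 = (k : Int) + 1 := by push_cast; ring
      rw [fuel_succ]
      simp only [hd, ih, inner_level k]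
      simp [hne, List.map_map]
      simp [List.flatMap_def, Function.comp_def]

-- ===== VERDICT (by name: the statement is the Claim_ definition above) =====
theorem makePalendrome_spec : Claim_equal_makePalendrome := by
  intro digits first _ hpre
  unfold Spec_makePalendrome makePalendrome makePalendrome_alt
  by_cases hf : 10 ≤ first
  · rw [PySem.List.pyRange_one_eq_nil (by omega)]
    cases h : digits.toNat with
    | zero => simp [makePalendromeFuel]
    | succ n => simp [makePalendromeFuel, PySem.List.pyRange_one_eq_nil (show (10:Int) ≤ first by omega)]
  · have hd : 1 ≤ digits := by
      rcases hpre with h | h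
      · exact h
      · omega
    obtain ⟨k, hk⟩ : ∃ k : Nat, digits = (k : Int) + 1 := ⟨(digits - 1).toNat, by omega⟩
    have htn : digits.toNat = k + 1 := by omega
    rw [htn, hk, main_level k first]
    have h1 : ((k : Int) + 1) - 1 = (k : Int) := by ring
    refine List.flatMap_congr (fun n _ => ?_)
    by_cases hk0 : k = 0
    · subst hk0; simp
    · simp [h1, hk0]
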